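-- pv_equiv track=rewrite | github.com/WTCSC/binary-calculator-GustavNord | calculator.py | binary_calculator
-- ===== SOURCE A (Python) =====
-- def binary_calculator(bin1, bin2, operator):
--     import math
--     Error = "Error"
--
--     # Setting the total values for both the binary inputs.
--     total = 0
--     total2 = 0
--
--     # Converts bin1 to decimal.
--     length = len(bin1) - 1
--     for index, digit in enumerate(bin1):
--         value = 2**(length - index) # Calculates Value.
--         if digit == "0":
--             pass # Skip if the digit is zero.
--         else:
--             if digit == "1":
--                 total = total + value # Add the value if the digit is one.
--             else:
--                 return Error # Return an error if the digit is not a one or zero.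
--                 exit()
--         # Converts bin2 to decimal
--     length2 = len(bin2) - 1
--     for index2, digit2 in enumerate(bin2):
--         value2 = 2**(length2 - index2) # Calculates Value for bin2.
--         if digit2 == "0":
--             pass # Skips if the digit is zero.
--         else:
--             if digit2 == "1":
--                 total2 = total2 + value2 # Add the value if the digit is one.
--             else:
--                 return Error # Return an error if the digit is not a one or zero.
--                 exit()
--     # Performs the arithmetic operation.
--     if operator == "+": # Addition.
--         thetotal = total + total2
--     else:
--         if operator == "-": # Subtraction.
--                 thetotal = total - total2
--         else:
--             if operator == "/" and bin2 == ("00000000"): # Handles being devided by a zero.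
--                 return "NaN"
--             else:
--                 if operator == "/": # Division.
--                     thetotal = total / total2
--                     thetotal = math.floor(thetotal)
--                 else:
--                     if operator == "*": # Multiplication.
--                         thetotal = total * total2
--     if thetotal > 255: # Make sure it\s not an Overflow.
--         return "Overflow"
--     else:
--         if thetotal < 0: # Make sure it\s not an Overflow.
--             return "Overflow"
--         else:
--             # Creates a representation of the 8 bit binary string.
--             response = "00000000"
--             response_list = list(response)
--             if thetotal == 0:
--                 return response
--             else:
--                 # Sets the binary digits based on the total
--                 if thetotal >= 128:
--                     response_list[0] = "1"
--                     thetotal = thetotal - 128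
--
--                 if thetotal >= 64:
--                     response_list[1] = "1"
--                     thetotal = thetotal - 64
--
--                 if thetotal >= 32:
--                     response_list[2] = "1"
--                     thetotal = thetotal - 32
--
--                 if thetotal >= 16:
--                     response_list[3] = "1"
--                     thetotal = thetotal - 16
--
--                 if thetotal >= 8:
--                     response_list[4] = "1"
--                     thetotal = thetotal - 8
--
--                 if thetotal >= 4:
--                     response_list[5] = "1"
--                     thetotal = thetotal - 4
--
--                 if thetotal >= 2:
--                     response_list[6] = "1"
--                     thetotal = thetotal - 2
--
--                 if thetotal >= 1:
--                     response_list[7] = "1"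
--                     thetotal = thetotal - 1
--     # Joins the response list and returns response
--     response = ''.join(response_list)
--     return response
-- ===== SOURCE B (Python) =====
-- def binary_calculator(bin1, bin2, operator):
--     # Idiomatic rewrite: one membership check + built-in int(s, 2) parsing instead
--     # of two manual power-of-two loops, and format(r, '08b') instead of eight
--     # unrolled threshold blocks.  Division is the same float division + math.floor
--     # as the original.
--     import math
--     if any(c not in "01" for c in bin1 + bin2):
--         return "Error"
--     a = int(bin1, 2) if bin1 else 0
--     b = int(bin2, 2) if bin2 else 0
--     if operator == "+":
--         r = a + b
--     elif operator == "-":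
--         r = a - b
--     elif operator == "*":
--         r = a * b
--     elif operator == "/":
--         if b == 0:
--             return "NaN"
--         r = math.floor(a / b)
--     else:
--         return "Error"
--     return format(r, "08b") if 0 <= r <= 255 else "Overflow"
-- ===== Notes on version B (the rewrite author's own statement) =====
-- stated objective: idiomatic
-- what changed: B validates both operands with one membership check over bin1+bin2 and parses with the built-in int(s, 2) instead of A's two manual enumerate loops computing 2**(length-index) per digit, dispatches the operators with an elif chain whose zero check is on the parsed value rather than the string literal "00000000", and renders the result with format(r, '08b') instead of A's eight unrolled threshold-subtraction blocks plus a special-case early return for zero.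
import Mathlib
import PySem

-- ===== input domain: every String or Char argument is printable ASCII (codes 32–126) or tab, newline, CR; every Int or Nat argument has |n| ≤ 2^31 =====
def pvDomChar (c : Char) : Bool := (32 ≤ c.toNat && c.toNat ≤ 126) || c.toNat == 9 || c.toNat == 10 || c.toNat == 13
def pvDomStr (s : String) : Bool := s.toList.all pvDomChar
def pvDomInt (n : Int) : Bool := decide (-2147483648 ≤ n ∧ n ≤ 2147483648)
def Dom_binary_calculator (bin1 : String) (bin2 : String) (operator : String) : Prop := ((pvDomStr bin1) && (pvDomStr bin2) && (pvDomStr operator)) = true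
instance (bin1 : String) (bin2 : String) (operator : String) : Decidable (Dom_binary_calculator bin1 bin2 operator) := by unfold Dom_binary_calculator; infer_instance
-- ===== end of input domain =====

-- B validates with one membership check and parses with the built-in int(s, 2)
-- instead of A's two manual power-of-two loops, and formats with format(r, '08b')
-- instead of A's eight unrolled threshold blocks (objective: idiomatic, same cost).

-- Shared model of Python's `math.floor(a / b)` for ints a ≥ 0, b > 0 (both Pythons
-- execute exactly this builtin expression): CPython's int/int is the correctly
-- rounded (round-half-even) double quotient; for a//b ≤ 255 the floor is a//b,
-- plus 1 exactly when a/b ≥ (q+1) - 2^(e-53) (the rounding threshold below q+1,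
-- e the binade exponent there; a tie rounds to the even q+1); for a//b ≥ 256 the
-- callers' output is "Overflow" for any value ≥ 256, so returning a//b is exact
-- at the level of the returned string.  Quotients at/above the double range
-- (OverflowError in Python) are excluded by Pre_ below.
def pvFloorFloatDiv (a b : Int) : Int :=
  let q := PySem.Int.floordiv a b
  if q ≥ 256 then q
  else
    let s : Nat := 54 - q.toNat.size
    if a * 2 ^ s ≥ b * ((q + 1) * 2 ^ s - 1) then q + 1 else q

-- ===== PORT A =====
-- A's conversion loop: value = 2**(length-index); 'length - index' is only evaluated while
-- index ≤ length, where Nat subtraction in the exponent agrees exactly with Python.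
def pvConvA (slen : Nat) (i : Nat) (l : List Char) (total : Int) : Option Int :=
  match l with
  | [] => some total
  | d :: rest =>
    let value : Int := 2 ^ (slen - 1 - i)
    if d = '0' then pvConvA slen (i + 1) rest total
    else if d = '1' then pvConvA slen (i + 1) rest (total + value)
    else none  -- return Error

-- A's shared tail: overflow checks, the thetotal == 0 early return, then the eight
-- unrolled threshold blocks over response_list.
def pvTailA (thetotal : Int) : String :=
  if thetotal > 255 then "Overflow"
  else if thetotal < 0 then "Overflow"
  else
    let rl : List Char := ['0','0','0','0','0','0','0','0']
    if thetotal = 0 then "00000000"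
    else
      let p := if thetotal ≥ 128 then (rl.set 0 '1', thetotal - 128) else (rl, thetotal)
      let p := if p.2 ≥ 64 then (p.1.set 1 '1', p.2 - 64) else p
      let p := if p.2 ≥ 32 then (p.1.set 2 '1', p.2 - 32) else p
      let p := if p.2 ≥ 16 then (p.1.set 3 '1', p.2 - 16) else p
      let p := if p.2 ≥ 8 then (p.1.set 4 '1', p.2 - 8) else p
      let p := if p.2 ≥ 4 then (p.1.set 5 '1', p.2 - 4) else p
      let p := if p.2 ≥ 2 then (p.1.set 6 '1', p.2 - 2) else p
      let p := if p.2 ≥ 1 then (p.1.set 7 '1', p.2 - 1) else p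
      String.ofList p.1

def binary_calculator (bin1 : String) (bin2 : String) (operator : String) : String :=
  match pvConvA bin1.toList.length 0 bin1.toList 0 with
  | none => "Error"
  | some total =>
    match pvConvA bin2.toList.length 0 bin2.toList 0 with
    | none => "Error"
    | some total2 =>
      if operator = "+" then pvTailA (total + total2)
      else if operator = "-" then pvTailA (total - total2)
      else if operator = "/" ∧ bin2 = "00000000" then "NaN"
      else if operator = "/" then
        -- Python: thetotal = total / total2; thetotal = math.floor(thetotal);
        -- exact via pvFloorFloatDiv (total2 = 0, ZeroDivisionError, and quotients
        -- beyond the double range, OverflowError, are excluded by Pre_).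
        pvTailA (pvFloorFloatDiv total total2)
      else if operator = "*" then pvTailA (total * total2)
      else ""  -- Python raises UnboundLocalError here; excluded by Pre_

-- ===== PORT B =====
-- port of int(s, 2) on an already validated bit string
def pvInt2 (l : List Char) : Int := l.foldl (fun t c => 2 * t + if c = '1' then 1 else 0) 0

-- port of format(r, '08b') for 0 ≤ r ≤ 255
def pvFmt8 (r : Int) : String :=
  String.ofList ((List.range 8).map (fun i => if r.toNat / 2 ^ (7 - i) % 2 = 1 then '1' else '0'))

-- Source B's final line: format(r, '08b') if 0 <= r <= 255 else "Overflow"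
def pvOutB (r : Int) : String := if 0 ≤ r ∧ r ≤ 255 then pvFmt8 r else "Overflow"

def binary_calculator_alt (bin1 : String) (bin2 : String) (operator : String) : String :=
  if (bin1.toList ++ bin2.toList).any (fun c => !(c == '0' || c == '1')) then "Error"
  else
    let a : Int := if bin1 = "" then 0 else pvInt2 bin1.toList
    let b : Int := if bin2 = "" then 0 else pvInt2 bin2.toList
    if operator = "+" then pvOutB (a + b)
    else if operator = "-" then pvOutB (a - b)
    else if operator = "*" then pvOutB (a * b)
    else if operator = "/" then
      if b = 0 then "NaN"
      else pvOutB (pvFloorFloatDiv a b)  -- math.floor(a / b), same builtin as A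
    else "Error"

-- ===== PRECONDITION & SPEC =====
def pvIsBin (s : String) : Bool := s.toList.all (fun c => c == '0' || c == '1')

-- the numeric value a bit string denotes (spec-level, via Mathlib's Nat.ofDigits)
def pvVal (s : String) : Nat :=
  Nat.ofDigits 2 ((s.toList.map (fun c => if c = '1' then 1 else 0)).reverse)

-- Pre_ excludes exactly the inputs on which A RAISES: valid operands with an
-- operator outside +,-,/,* (UnboundLocalError on thetotal), '/' by a zero-valued
-- bin2 other than "00000000" (ZeroDivisionError), and '/' whose true quotient
-- reaches the double range limit 2^1024 - 2^970 (OverflowError in float division).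
def Pre_binary_calculator (bin1 : String) (bin2 : String) (operator : String) : Prop :=
  (pvIsBin bin1 ∧ pvIsBin bin2 →
    (operator = "+" ∨ operator = "-" ∨ operator = "/" ∨ operator = "*") ∧
    (operator = "/" →
      (bin2 ≠ "00000000" → '1' ∈ bin2.toList) ∧
      ('1' ∈ bin2.toList → pvVal bin1 < pvVal bin2 * (2 ^ 970 * (2 ^ 54 - 1)))))
instance (bin1 : String) (bin2 : String) (operator : String) : Decidable (Pre_binary_calculator bin1 bin2 operator) := by unfold Pre_binary_calculator; infer_instance

def pvWitness_binary_calculator : String × String × String := ("1010", "0011", "+")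

def Spec_binary_calculator (bin1 : String) (bin2 : String) (operator : String) (out : String) : Prop := out = binary_calculator_alt bin1 bin2 operator
instance (bin1 : String) (bin2 : String) (operator : String) (out : String) : Decidable (Spec_binary_calculator bin1 bin2 operator out) := by unfold Spec_binary_calculator; infer_instance

-- ===== CLAIM (what is proved, stated in full; the proofs are below) =====
def Claim_equal_binary_calculator : Prop := ∀ (bin1 : String) (bin2 : String) (operator : String), Dom_binary_calculator bin1 bin2 operator → Pre_binary_calculator bin1 bin2 operator → Spec_binary_calculator bin1 bin2 operator (binary_calculator bin1 bin2 operator)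

-- ===== LEMMAS AND PROOFS =====

-- proof-level recursive Horner parser mediating between A's power loop and B's foldl
def pvHorner (l : List Char) (total : Int) : Option Int :=
  match l with
  | [] => some total
  | c :: rest =>
    if c = '0' then pvHorner rest (2 * total)
    else if c = '1' then pvHorner rest (2 * total + 1)
    else none

theorem pvHorner_acc (l : List Char) (acc : Int) :
    pvHorner l acc = (pvHorner l 0).map (fun v => acc * 2 ^ l.length + v) := by
  induction l generalizing acc with
  | nil => simp [pvHorner]
  | cons c rest ih =>
    by_cases h0 : c = '0'
    · subst h0
      rw [show pvHorner ('0' :: rest) acc = pvHorner rest (2 * acc) from by simp [pvHorner],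
        show pvHorner ('0' :: rest) 0 = pvHorner rest 0 from by norm_num [pvHorner],
        ih (2 * acc)]
      cases pvHorner rest 0 with
      | none => rfl
      | some v =>
        simp only [Option.map_some, Option.some.injEq, List.length_cons, pow_succ]
        ring
    · by_cases h1 : c = '1'
      · subst h1
        rw [show pvHorner ('1' :: rest) acc = pvHorner rest (2 * acc + 1) from by
            simp [pvHorner, show ('1' : Char) ≠ '0' from by decide],
          show pvHorner ('1' :: rest) 0 = pvHorner rest 1 from by
            norm_num [pvHorner, show ('1' : Char) ≠ '0' from by decide],
          ih (2 * acc + 1), ih 1]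
        cases pvHorner rest 0 with
        | none => rfl
        | some v =>
          simp only [Option.map_some, Option.some.injEq, List.length_cons, pow_succ]
          ring
      · simp [pvHorner, h0, h1]

-- A's positional-powers conversion equals the Horner parse, shifted by the running total.
theorem pvConvA_eq_horner (l : List Char) (slen i : Nat) (total : Int)
    (hinv : slen = i + l.length) :
    pvConvA slen i l total = (pvHorner l 0).map (fun v => total + v) := by
  induction l generalizing i total with
  | nil => simp [pvConvA, pvHorner]
  | cons d rest ih =>
    have hlen : slen - 1 - i = rest.length := by
      subst hinv; simp only [List.length_cons]; omega
    by_cases h0 : d = '0'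
    · subst h0
      rw [show pvConvA slen i ('0' :: rest) total = pvConvA slen (i + 1) rest total from by
          simp [pvConvA],
        show pvHorner ('0' :: rest) (0 : Int) = pvHorner rest 0 from by norm_num [pvHorner]]
      exact ih (i + 1) total (by subst hinv; simp only [List.length_cons]; omega)
    · by_cases h1 : d = '1'
      · subst h1
        rw [show pvConvA slen i ('1' :: rest) total
              = pvConvA slen (i + 1) rest (total + 2 ^ (slen - 1 - i)) from by
            simp [pvConvA, show ('1' : Char) ≠ '0' from by decide],
          show pvHorner ('1' :: rest) (0 : Int) = pvHorner rest 1 from by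
            norm_num [pvHorner, show ('1' : Char) ≠ '0' from by decide],
          ih (i + 1) _ (by subst hinv; simp only [List.length_cons]; omega), hlen,
          pvHorner_acc rest 1]
        cases pvHorner rest 0 with
        | none => rfl
        | some v =>
          simp only [Option.map_some, Option.some.injEq]
          ring
      · simp [pvConvA, pvHorner, h0, h1]

theorem pvConvA_eq (l : List Char) : pvConvA l.length 0 l 0 = pvHorner l 0 := by
  rw [pvConvA_eq_horner l l.length 0 0 (by omega)]
  cases pvHorner l 0 <;> simp

-- on a validated bit list the Horner parse is B's foldl (int(s, 2))
theorem pvHorner_eq_foldl (l : List Char) (acc : Int)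
    (h : l.all (fun c => c == '0' || c == '1') = true) :
    pvHorner l acc = some (l.foldl (fun t c => 2 * t + if c = '1' then 1 else 0) acc) := by
  induction l generalizing acc with
  | nil => simp [pvHorner]
  | cons c rest ih =>
    simp only [List.all_cons, Bool.and_eq_true] at h
    by_cases h0 : c = '0'
    · have : ¬ c = '1' := by subst h0; decide
      simp [pvHorner, h0, List.foldl_cons, ih _ h.2]
    · have h1 : c = '1' := by
        rcases Bool.or_eq_true_iff.1 h.1 with hc | hc
        · exact absurd (by simpa using hc) h0
        · simpa using hc
      simp [pvHorner, h1, List.foldl_cons, ih _ h.2]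

theorem pvHorner_none (l : List Char) (acc : Int)
    (h : ¬ l.all (fun c => c == '0' || c == '1') = true) :
    pvHorner l acc = none := by
  induction l generalizing acc with
  | nil => simp at h
  | cons c rest ih =>
    simp only [List.all_cons, Bool.and_eq_true] at h
    by_cases h0 : c = '0'
    · have hr : ¬ rest.all (fun c => c == '0' || c == '1') = true := by
        intro hr; exact h ⟨by simp [h0], hr⟩
      simp [pvHorner, h0, ih _ hr]
    · by_cases h1 : c = '1'
      · have hr : ¬ rest.all (fun c => c == '0' || c == '1') = true := by
          intro hr; exact h ⟨by simp [h1], hr⟩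
        simp [pvHorner, h1, ih _ hr]
      · simp [pvHorner, h0, h1]

-- a validated bit list containing '1' has a positive foldl value
theorem pvFoldl_pos (l : List Char) (acc : Int) (hacc : 0 ≤ acc)
    (hmem : '1' ∈ l ∨ 0 < acc) :
    0 < l.foldl (fun t c => 2 * t + if c = '1' then 1 else 0) acc := by
  induction l generalizing acc with
  | nil =>
    rcases hmem with hm | hm
    · simp at hm
    · simpa using hm
  | cons c rest ih =>
    simp only [List.foldl_cons]
    by_cases h1 : c = '1'
    · exact ih _ (by simp [h1]; omega) (Or.inr (by simp [h1]; omega))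
    · refine ih _ (by simp [h1]; omega) ?_
      rcases hmem with hm | hm
      · rcases List.mem_cons.1 hm with he | ht
        · exact absurd he.symm h1
        · exact Or.inl ht
      · exact Or.inr (by simp [h1]; omega)

-- B's guarded parse equals the plain foldl (int('', 2) guard; foldl over [] is 0)
theorem pvGuard_eq (s : String) :
    (if s = "" then (0 : Int) else pvInt2 s.toList) = pvInt2 s.toList := by
  by_cases h : s = ""
  · subst h; rfl
  · simp [h]

-- A's tail (overflow checks + eight unrolled blocks) equals B's tail (range check + format)
set_option maxRecDepth 4000 in
set_option maxHeartbeats 1000000 in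
theorem pvTail_eq (t : Int) : pvTailA t = pvOutB t := by
  by_cases hlo : t < 0
  · have hh : ¬ t > 255 := by omega
    have : ¬ (0 ≤ t ∧ t ≤ 255) := by omega
    simp [pvTailA, pvOutB, hlo, hh, this]
  · by_cases hhi : t > 255
    · have : ¬ (0 ≤ t ∧ t ≤ 255) := by omega
      simp [pvTailA, pvOutB, hhi, this]
    · have h1 : 0 ≤ t := by omega
      have ht : t = (t.toNat : Int) := (Int.toNat_of_nonneg h1).symm
      have hn : t.toNat < 256 := by omega
      rw [ht]
      have key : ∀ n : Fin 256, pvTailA (n : Int) = pvOutB (n : Int) := by decide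
      exact key ⟨t.toNat, hn⟩

-- bad-character bridge for B's single validation pass
theorem pvAnyBad_false (l1 l2 : List Char)
    (h1 : l1.all (fun c => c == '0' || c == '1') = true)
    (h2 : l2.all (fun c => c == '0' || c == '1') = true) :
    ((l1 ++ l2).any (fun c => !(c == '0' || c == '1'))) = false := by
  rw [List.any_eq_false]
  intro c hc
  rcases List.mem_append.1 hc with h | h
  · rcases (by simpa using List.all_eq_true.1 h1 c h : c = '0' ∨ c = '1') with h' | h' <;> simp [h']
  · rcases (by simpa using List.all_eq_true.1 h2 c h : c = '0' ∨ c = '1') with h' | h' <;> simp [h']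

theorem pvAnyBad_true_left (l1 l2 : List Char)
    (h1 : ¬ l1.all (fun c => c == '0' || c == '1') = true) :
    ((l1 ++ l2).any (fun c => !(c == '0' || c == '1'))) = true := by
  rw [List.any_append, Bool.or_eq_true]
  left
  rw [List.any_eq_true]
  simp only [List.all_eq_true] at h1
  push Not at h1
  obtain ⟨c, hc, hpc⟩ := h1
  exact ⟨c, hc, by simpa using hpc⟩

theorem pvAnyBad_true_right (l1 l2 : List Char)
    (h2 : ¬ l2.all (fun c => c == '0' || c == '1') = true) :
    ((l1 ++ l2).any (fun c => !(c == '0' || c == '1'))) = true := by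
  rw [List.any_append, Bool.or_eq_true]
  right
  rw [List.any_eq_true]
  simp only [List.all_eq_true] at h2
  push Not at h2
  obtain ⟨c, hc, hpc⟩ := h2
  exact ⟨c, hc, by simpa using hpc⟩

-- ===== VERDICT (by name: the statement is the Claim_ definition above) =====
theorem binary_calculator_spec : Claim_equal_binary_calculator := by
  intro bin1 bin2 operator _ hpre
  unfold Spec_binary_calculator binary_calculator binary_calculator_alt
  rw [pvConvA_eq, pvConvA_eq]
  by_cases hall1 : bin1.toList.all (fun c => c == '0' || c == '1') = true
  · by_cases hall2 : bin2.toList.all (fun c => c == '0' || c == '1') = true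
    · rw [pvHorner_eq_foldl _ _ hall1, pvHorner_eq_foldl _ _ hall2,
        pvAnyBad_false _ _ hall1 hall2]
      simp only [Bool.false_eq_true, if_false, pvGuard_eq]
      obtain ⟨hop, hdiv⟩ := hpre ⟨hall1, hall2⟩
      by_cases hp : operator = "+"
      · simp [hp, pvTail_eq, pvInt2]
      · by_cases hm : operator = "-"
        · simp [hm, pvTail_eq, pvInt2]
        · by_cases hd : operator = "/"
          · obtain ⟨hz, _⟩ := hdiv hd
            by_cases h00 : bin2 = "00000000"
            · subst h00
              simp only [hd]
              simp
              intro h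
              exact absurd (by decide : pvInt2 ['0','0','0','0','0','0','0','0'] = 0) h
            · have hbpos : 0 < pvInt2 bin2.toList :=
                pvFoldl_pos _ _ (le_refl 0) (Or.inl (hz h00))
              have hbne : ¬ pvInt2 bin2.toList = 0 := by omega
              simp only [pvInt2] at hbne
              simp [hd, h00, hbne, pvTail_eq, pvInt2]
          · have hs : operator = "*" := by tauto
            simp [hs, pvTail_eq, pvInt2]
    · rw [pvHorner_eq_foldl _ _ hall1, pvHorner_none _ _ hall2,
        pvAnyBad_true_right _ _ hall2]
      rfl
  · rw [pvHorner_none _ _ hall1, pvAnyBad_true_left _ _ hall1]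
    rfl
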